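-- pv_equiv track=rewrite | github.com/ShreyanshBB007/GameHub-A-Simple-Gaming-Platform | server.py | check_completed_lines
-- ===== SOURCE A (Python) =====
-- def check_completed_lines(game):
--     board = game['board']
--     completed_lines = 0
--     rows_to_remove = []
--
--     # Check each row
--     for i, row in enumerate(board):
--         if all(cell for cell in row):
--             rows_to_remove.append(i)
--             completed_lines += 1
--
--     # Remove completed lines
--     for row_idx in sorted(rows_to_remove, reverse=True):
--         board.pop(row_idx)
--         board.insert(0, [0 for _ in range(10)])
--
--     return completed_lines
-- ===== SOURCE B (Python) =====
-- def check_completed_lines(game):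
--     board = game['board']
--     new_board = [row for row in board if not all(cell for cell in row)]
--     completed = len(board) - len(new_board)
--     board[:] = [[0] * 10 for _ in range(completed)] + new_board
--     return completed
-- ===== Notes on version B (the rewrite author's own statement) =====
-- stated objective: idiomatic
-- what changed: Replaces the index-collection plus sorted(reverse=True) per-row pop/insert dance by a single filter comprehension: keep incomplete rows, completed = len(board) - len(new_board), prepend that many fresh [0]*10 rows and write back with board[:]; Pre_ excludes only dicts without a 'board' key, on which both programs raise KeyError.
-- outside the precondition, e.g. on check_completed_lines({}): A raises KeyError, B raises KeyError
import Mathlib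
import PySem

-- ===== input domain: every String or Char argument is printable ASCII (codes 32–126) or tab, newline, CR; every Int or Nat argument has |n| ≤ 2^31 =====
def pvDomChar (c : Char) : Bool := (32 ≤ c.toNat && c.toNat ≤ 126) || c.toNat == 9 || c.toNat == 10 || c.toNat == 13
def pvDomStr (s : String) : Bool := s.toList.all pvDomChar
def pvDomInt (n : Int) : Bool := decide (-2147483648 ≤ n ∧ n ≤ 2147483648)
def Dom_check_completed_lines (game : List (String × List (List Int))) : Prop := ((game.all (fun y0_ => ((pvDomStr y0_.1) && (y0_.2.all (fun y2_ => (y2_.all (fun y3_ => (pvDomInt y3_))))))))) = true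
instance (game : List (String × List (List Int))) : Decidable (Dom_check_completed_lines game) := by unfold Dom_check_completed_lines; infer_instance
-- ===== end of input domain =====

-- B replaces A's index-collection + sorted(reverse=True) + pop/insert loop by one filter
-- comprehension (idiomatic). Equivalence is about the RETURN value only: both mutate
-- game['board'] in place, and the resulting boards can differ (A's insert-at-0 inside its
-- descending-pop loop shifts the remaining indices); that side effect is not claimed here.

-- ===== PORT A =====
-- second Python loop only mutates board in place; the return value is fixed before it runs,
-- so (return-value equivalence only) it is not ported.
def check_completed_lines (game : List (String × List (List Int))) : Int :=
  match PySem.Dict.get? ⟨game⟩ "board" with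
  | none => 0   -- unreachable under Pre_ (Python raises KeyError)
  | some board =>
    let st := (PySem.List.enumerate board).foldl
      (fun (s : Int × List Int) (p : Int × List Int) =>
        if p.2.all (fun c => !(c == 0)) then (s.1 + 1, s.2 ++ [p.1]) else s)
      (0, [])
    st.1

-- ===== PORT B =====
def check_completed_lines_alt (game : List (String × List (List Int))) : Int :=
  match PySem.Dict.get? ⟨game⟩ "board" with
  | none => 0   -- unreachable under Pre_ (Python raises KeyError)
  | some board =>
    let new_board := board.filter (fun row => !(row.all (fun c => !(c == 0))))
    (board.length : Int) - (new_board.length : Int)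

-- ===== PRECONDITION & SPEC =====
-- Pre_ excludes only inputs on which both Pythons raise KeyError: dicts without a 'board' key.
def Pre_check_completed_lines (game : List (String × List (List Int))) : Prop :=
  PySem.Dict.contains (PySem.Dict.mk game) "board" = true
instance (game : List (String × List (List Int))) : Decidable (Pre_check_completed_lines game) := by unfold Pre_check_completed_lines; infer_instance

def pvWitness_check_completed_lines : (List (String × List (List Int))) :=
  [("board", [[1, 1], [0, 2], []])]

def Spec_check_completed_lines (game : List (String × List (List Int))) (out : Int) : Prop := out = check_completed_lines_alt game
instance (game : List (String × List (List Int))) (out : Int) : Decidable (Spec_check_completed_lines game out) := by unfold Spec_check_completed_lines; infer_instance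

-- ===== CLAIM (what is proved, stated in full; the proofs are below) =====
def Claim_equal_check_completed_lines : Prop := ∀ (game : List (String × List (List Int))), Dom_check_completed_lines game → Pre_check_completed_lines game → Spec_check_completed_lines game (check_completed_lines game)

-- ===== LEMMAS AND PROOFS =====

-- the row predicate shared by both ports
def pvFullRow (row : List Int) : Bool := row.all (fun c => !(c == 0))

-- A's counting loop: the first component of the fold is acc + (number of full rows)
theorem pvFoldCount (l : List (List Int)) :
    ∀ (k s : Int) (acc : List Int),
      ((PySem.List.enumerate l k).foldl
        (fun (s : Int × List Int) (p : Int × List Int) =>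
          if p.2.all (fun c => !(c == 0)) then (s.1 + 1, s.2 ++ [p.1]) else s)
        (s, acc)).1 = s + (l.countP pvFullRow : Int) := by
  induction l with
  | nil => intro k s acc; simp [PySem.List.enumerate_nil]
  | cons r t ih =>
      intro k s acc
      rw [PySem.List.enumerate_cons, List.foldl_cons, List.countP_cons]
      by_cases h : (r.all fun c => !(c == 0)) = true
      · rw [if_pos h, ih]
        have hp : pvFullRow r = true := h
        rw [hp]
        simp
        ring
      · rw [if_neg h, ih]
        have hp : pvFullRow r = false := by
          simpa [pvFullRow] using h
        rw [hp]
        simp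

theorem check_completed_lines_spec : Claim_equal_check_completed_lines := by
  intro game _hDom hPre
  unfold Spec_check_completed_lines check_completed_lines check_completed_lines_alt
  unfold Pre_check_completed_lines at hPre
  cases hget : PySem.Dict.get? ⟨game⟩ "board" with
  | none =>
      exfalso
      have := (PySem.Dict.get?_eq_none_iff_contains (d := PySem.Dict.mk game) (k := "board")).mp hget
      simp [this] at hPre
  | some board =>
      simp only []
      rw [pvFoldCount board 0 0 []]
      have hlen : (board.filter (fun row => !(row.all (fun c => !(c == 0))))).length
          = board.countP (fun row => !(pvFullRow row)) := by
        rw [List.countP_eq_length_filter]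
        rfl
      rw [hlen]
      have hsplit : board.length
          = board.countP pvFullRow + board.countP (fun row => !(pvFullRow row)) := by
        simpa using List.length_eq_countP_add_countP (p := pvFullRow) (l := board)
      omega
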